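-- pv_equiv track=rewrite | github.com/nimohLee/JavaCodingTestStudy | baekjoon/boj_2864.py | setFiveOrSix
-- ===== SOURCE A (Python) =====
-- def setFiveOrSix(number):
--     five_ver = ''
--     six_ver = ''
--     for i in number:
--       if i == '5':
--           five_ver += i
--           six_ver += '6'
--       elif i == '6':
--           five_ver += '5'
--           six_ver += i
--       else:
--           five_ver += i
--           six_ver += i
--     return five_ver, six_ver
-- ===== SOURCE B (Python) =====
-- def setFiveOrSix(number):
--     return number.replace('6', '5'), number.replace('5', '6')
-- ===== Notes on version B (the rewrite author's own statement) =====
-- stated objective: idiomatic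
-- what changed: Replaced the single explicit per-character loop with a three-way branch and two string accumulators by two independent whole-string str.replace passes (6->5 for the min, 5->6 for the max).
import Mathlib
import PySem

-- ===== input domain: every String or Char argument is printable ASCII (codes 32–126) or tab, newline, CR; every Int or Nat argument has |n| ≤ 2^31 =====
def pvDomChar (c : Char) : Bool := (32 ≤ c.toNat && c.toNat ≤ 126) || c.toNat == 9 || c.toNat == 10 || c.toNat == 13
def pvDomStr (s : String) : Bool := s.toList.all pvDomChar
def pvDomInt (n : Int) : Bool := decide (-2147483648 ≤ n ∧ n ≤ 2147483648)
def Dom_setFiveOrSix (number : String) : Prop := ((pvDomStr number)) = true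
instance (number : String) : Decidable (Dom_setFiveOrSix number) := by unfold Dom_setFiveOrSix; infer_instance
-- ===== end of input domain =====

-- B computes the same (min, max) pair with two whole-string str.replace passes instead of one explicit per-character loop (idiomatic decomposition).


-- ===== PORT A =====
-- the loop over the characters with the two growing accumulators, branches in source order
def setFiveOrSix (number : String) : String × String :=
  let r := number.toList.foldl
    (fun (st : List Char × List Char) i =>
      if i = '5' then (st.1 ++ [i], st.2 ++ ['6'])
      else if i = '6' then (st.1 ++ ['5'], st.2 ++ [i])
      else (st.1 ++ [i], st.2 ++ [i]))
    ([], [])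
  (String.ofList r.1, String.ofList r.2)

-- ===== PORT B =====
def setFiveOrSix_alt (number : String) : String × String :=
  (PySem.Str.replace number "6" "5", PySem.Str.replace number "5" "6")

-- ===== PRECONDITION & SPEC =====
def Spec_setFiveOrSix (number : String) (out : String × String) : Prop := out = setFiveOrSix_alt number
instance (number : String) (out : String × String) : Decidable (Spec_setFiveOrSix number out) := by unfold Spec_setFiveOrSix; infer_instance

-- ===== CLAIM (what is proved, stated in full; the proofs are below) =====
def Claim_equal_setFiveOrSix : Prop := ∀ (number : String), Dom_setFiveOrSix number → Spec_setFiveOrSix number (setFiveOrSix number)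

-- ===== LEMMAS AND PROOFS =====

-- single-character replace is a map
theorem replace_go_single (o n : Char) :
    ∀ (l : List Char) (fuel : Nat) (acc : List Char), l.length ≤ fuel →
      PySem.Chars.replace.go [o] [n] fuel l acc
        = acc.reverse ++ l.map (fun c => if c = o then n else c) := by
  intro l
  induction l with
  | nil =>
      intro fuel acc _
      cases fuel <;> simp [PySem.Chars.replace.go]
  | cons c t ih =>
      intro fuel acc h
      cases fuel with
      | zero => simp at h
      | succ fuel =>
        by_cases hc : c = o
        · subst hc
          have hp : List.isPrefixOf [c] (c :: t) = true := by
            simp [List.isPrefixOf]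
          simp only [PySem.Chars.replace.go, hp, if_pos]
          show PySem.Chars.replace.go [c] [n] fuel t (n :: acc) = _
          rw [ih fuel (n :: acc) (by simpa using Nat.le_of_succ_le_succ h)]
          simp
        · have hp : List.isPrefixOf [o] (c :: t) = false := by
            simp [List.isPrefixOf]; exact fun h => absurd h.symm hc
          simp only [PySem.Chars.replace.go, hp]
          rw [if_neg (by simp)]
          rw [ih fuel (c :: acc) (Nat.le_of_succ_le_succ h)]
          simp [hc]

theorem replace_single (o n : Char) (s : List Char) :
    PySem.Chars.replace s [o] [n] = s.map (fun c => if c = o then n else c) := by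
  have := replace_go_single o n s s.length [] (le_refl _)
  simpa [PySem.Chars.replace] using this

-- the loop computes the two maps
theorem foldl_two_maps (l : List Char) :
    ∀ (a b : List Char),
      l.foldl (fun (st : List Char × List Char) i =>
        if i = '5' then (st.1 ++ [i], st.2 ++ ['6'])
        else if i = '6' then (st.1 ++ ['5'], st.2 ++ [i])
        else (st.1 ++ [i], st.2 ++ [i])) (a, b)
      = (a ++ l.map (fun c => if c = '6' then '5' else c),
         b ++ l.map (fun c => if c = '5' then '6' else c)) := by
  induction l with
  | nil => intro a b; simp
  | cons c t ih =>
      intro a b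
      by_cases h5 : c = '5'
      · subst h5; simp [List.foldl_cons, ih]
      · by_cases h6 : c = '6'
        · subst h6; simp [List.foldl_cons, ih]
        · simp [List.foldl_cons, h5, h6, ih]

-- ===== VERDICT (by name: the statement is the Claim_ definition above) =====
theorem setFiveOrSix_spec : Claim_equal_setFiveOrSix := by
  intro number _
  unfold Spec_setFiveOrSix setFiveOrSix setFiveOrSix_alt
  simp only [foldl_two_maps, PySem.Str.replace]
  simp [replace_single]
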